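-- pv_equiv track=rewrite | github.com/mouredev/roadmap-retos-programacion | Roadmap/04 - CADENAS DE CARACTERES/python/hozlucas28.py | get_isogram_words
-- ===== SOURCE A (Python) =====
-- def get_isogram_words(words: list[str]) -> list[str]:
--     """Get isogram words"""
--     isograms: list[str] = []
--
--     for word in words:
--         word_formatted = word.replace(" ", "")
--         unique_chars = set(list(word_formatted))
--         if len(word_formatted) == len(unique_chars):
--             isograms.append(word)
--
--     return isograms
-- ===== SOURCE B (Python) =====
-- def _is_isogram(word: str) -> bool:
--     s = sorted(word.replace(" ", ""))
--     for a, b in zip(s, s[1:]):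
--         if a == b:
--             return False
--     return True
--
--
-- def get_isogram_words(words: list[str]) -> list[str]:
--     """Get isogram words"""
--     return [word for word in words if _is_isogram(word)]
-- ===== Notes on version B (the rewrite author's own statement) =====
-- stated objective: alternative
-- what changed: Replaces the set-size comparison by sorting each word's non-space characters and scanning adjacent pairs for a duplicate (with early exit), and builds the result with a comprehension instead of an accumulator loop.
import Mathlib
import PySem

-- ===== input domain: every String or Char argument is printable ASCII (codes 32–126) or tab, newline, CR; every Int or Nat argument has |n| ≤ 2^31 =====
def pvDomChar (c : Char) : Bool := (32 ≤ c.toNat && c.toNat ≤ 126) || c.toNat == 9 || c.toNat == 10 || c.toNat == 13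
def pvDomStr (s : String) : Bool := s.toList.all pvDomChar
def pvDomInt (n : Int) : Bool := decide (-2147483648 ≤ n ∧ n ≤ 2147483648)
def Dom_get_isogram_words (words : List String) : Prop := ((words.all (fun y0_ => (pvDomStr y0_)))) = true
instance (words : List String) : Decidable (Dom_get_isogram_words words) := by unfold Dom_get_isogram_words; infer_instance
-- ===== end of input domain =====

-- B replaces A's per-word set-size test by sort-then-adjacent-scan and the accumulator loop by a filter (objective: alternative; same results).
-- ===== PORT A =====
def get_isogram_words (words : List String) : List String :=
  words.foldl (fun isograms word =>
    let word_formatted := PySem.Str.replace word " " ""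
    let unique_chars : PySem.Set Char := PySem.Set.ofList word_formatted.toList
    if PySem.Str.len word_formatted = PySem.Set.len unique_chars then isograms ++ [word]
    else isograms) []

-- ===== PORT B =====
-- the 'for a, b in zip(s, s[1:])' adjacent scan with early return
def pvNoAdjDup : List Char → Bool
  | [] => true
  | [_] => true
  | a :: b :: t => if a == b then false else pvNoAdjDup (b :: t)

def pvIsIsogram (word : String) : Bool :=
  pvNoAdjDup (PySem.List.sorted (PySem.Str.replace word " " "").toList (fun c => c) false)

def get_isogram_words_alt (words : List String) : List String :=
  words.filter pvIsIsogram

-- ===== PRECONDITION & SPEC =====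
def Spec_get_isogram_words (words : List String) (out : List String) : Prop := out = get_isogram_words_alt words
instance (words : List String) (out : List String) : Decidable (Spec_get_isogram_words words out) := by unfold Spec_get_isogram_words; infer_instance

-- ===== CLAIM (what is proved, stated in full; the proofs are below) =====
def Claim_equal_get_isogram_words : Prop := ∀ (words : List String), Dom_get_isogram_words words → Spec_get_isogram_words words (get_isogram_words words)

-- ===== LEMMAS AND PROOFS =====

-- the adjacent-duplicate scan on a ≤-sorted list decides Nodup
theorem pvNoAdjDup_iff (s : List Char) (h : s.Pairwise (· ≤ ·)) :
    pvNoAdjDup s = true ↔ s.Nodup := by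
  induction s with
  | nil => simp [pvNoAdjDup]
  | cons a t ih =>
    cases t with
    | nil => simp [pvNoAdjDup]
    | cons b u =>
      rcases List.pairwise_cons.mp h with ⟨hab, ht⟩
      by_cases hab' : a = b
      · subst hab'
        simp [pvNoAdjDup]
      · have : pvNoAdjDup (a :: b :: u) = pvNoAdjDup (b :: u) := by
          simp [pvNoAdjDup, hab']
        rw [this, ih ht]
        constructor
        · intro hnd
          refine List.nodup_cons.mpr ⟨?_, hnd⟩
          intro hmem
          rcases List.mem_cons.mp hmem with h1 | h1
          · exact hab' h1
          · have hbu : b ≤ a := (List.pairwise_cons.mp ht).1 a h1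
            exact hab' (le_antisymm (hab b (List.mem_cons_self ..)) hbu)
        · intro hnd
          exact (List.nodup_cons.mp hnd).2

-- A's set-size test decides Nodup
theorem setLen_iff (l : List Char) :
    ((l.length : Int) = PySem.Set.len (PySem.Set.ofList l)) ↔ l.Nodup := by
  constructor
  · intro h
    have hlen : (PySem.Set.ofList l).length = l.length := by
      simp only [PySem.Set.len] at h
      omega
    have hsub : (PySem.Set.ofList l) ⊆ l := fun x hx => (PySem.Set.mem_ofList ..).mp hx
    have hsp := (PySem.Set.nodup_ofList l).subperm hsub
    have hperm := hsp.perm_of_length_le (by omega)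
    exact hperm.nodup_iff.mp (PySem.Set.nodup_ofList l)
  · intro h
    rw [PySem.Set.ofList_eq_self_of_nodup l h]
    simp [PySem.Set.len]

theorem isogram_test_eq (word : String) :
    ((PySem.Str.len (PySem.Str.replace word " " "") =
      PySem.Set.len (PySem.Set.ofList (PySem.Str.replace word " " "").toList))) ↔
      pvIsIsogram word = true := by
  set l := (PySem.Str.replace word " " "").toList with hl
  have hA : (PySem.Str.len (PySem.Str.replace word " " "") = PySem.Set.len (PySem.Set.ofList l)) ↔ l.Nodup := by
    rw [show PySem.Str.len (PySem.Str.replace word " " "") = (l.length : Int) by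
      simp [PySem.Str.len, hl]]
    exact setLen_iff l
  have hperm := PySem.List.sorted_perm l (fun c : Char => c) false
  have hB : pvIsIsogram word = true ↔ l.Nodup := by
    rw [pvIsIsogram, ← hl,
        pvNoAdjDup_iff _ (PySem.List.sorted_pairwise l (fun c : Char => c))]
    exact hperm.nodup_iff
  rw [hA, hB]

-- ===== VERDICT (by name: the statement is the Claim_ definition above) =====
theorem get_isogram_words_spec : Claim_equal_get_isogram_words := by
  intro words _
  unfold Spec_get_isogram_words get_isogram_words get_isogram_words_alt
  simp only []
  rw [PySem.List.foldl_append_ite_eq_filter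
        (fun word => PySem.Str.len (PySem.Str.replace word " " "") =
          PySem.Set.len (PySem.Set.ofList (PySem.Str.replace word " " "").toList)) words []]
  rw [List.nil_append]
  apply List.filter_congr
  intro w _
  rw [Bool.eq_iff_iff, decide_eq_true_iff]
  exact isogram_test_eq w
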